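-- pv_equiv track=rewrite | github.com/Lohann-cv/walet | walet.py.py | categories_of_outcomes
-- ===== SOURCE A (Python) =====
-- def categories_of_outcomes(outcomes, categories):
--     outcomes_categories = {}
--     for i in range(len(outcomes)):
--         category = categories[i]
--         if category in outcomes_categories:
--             outcomes_categories[category] += outcomes[i]
--         else:
--             outcomes_categories[category] = outcomes[i]
--     return outcomes_categories
-- ===== SOURCE B (Python) =====
-- # Two-pass group-then-reduce: first bucket values per category (first-appearance
-- # key order), then sum each bucket.  Same values and key order as A; same
-- # IndexError when categories is shorter than outcomes.
-- def categories_of_outcomes(outcomes, categories):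
--     buckets = {}
--     for i in range(len(outcomes)):
--         buckets.setdefault(categories[i], []).append(outcomes[i])
--     return {category: sum(values) for category, values in buckets.items()}
-- ===== Notes on version B (the rewrite author's own statement) =====
-- stated objective: alternative
-- what changed: A keeps running totals in a single accumulating loop; B first groups the outcomes into per-category value lists (preserving first-appearance key order) and then reduces each bucket with sum in a second pass.
import Mathlib
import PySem

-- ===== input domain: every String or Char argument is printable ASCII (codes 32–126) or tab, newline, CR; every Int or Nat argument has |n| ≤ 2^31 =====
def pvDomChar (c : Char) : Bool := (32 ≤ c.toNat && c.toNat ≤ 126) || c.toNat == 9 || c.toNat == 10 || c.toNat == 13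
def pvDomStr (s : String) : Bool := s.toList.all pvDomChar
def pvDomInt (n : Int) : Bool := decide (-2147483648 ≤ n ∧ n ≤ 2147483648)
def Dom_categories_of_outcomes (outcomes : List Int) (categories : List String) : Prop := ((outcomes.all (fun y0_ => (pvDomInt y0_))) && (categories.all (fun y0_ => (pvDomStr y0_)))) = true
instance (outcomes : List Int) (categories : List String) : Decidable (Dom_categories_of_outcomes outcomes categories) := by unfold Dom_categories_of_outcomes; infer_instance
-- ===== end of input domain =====

-- B replaces A's single running-total loop by grouping values per category and then summing each bucket (alternative decomposition, same cost).


-- ===== PORT A =====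
def categories_of_outcomes (outcomes : List Int) (categories : List String) : List (String × Int) :=
  ((PySem.List.pyRange 0 (outcomes.length : Int) 1).foldl
    (fun d i =>
      let category := PySem.List.pyGetD categories i ""
      if d.contains category then
        d.insert category (d.getD category 0 + PySem.List.pyGetD outcomes i 0)
      else
        d.insert category (PySem.List.pyGetD outcomes i 0))
    PySem.Dict.empty).items

-- ===== PORT B =====
def categories_of_outcomes_alt (outcomes : List Int) (categories : List String) : List (String × Int) :=
  let buckets : PySem.Dict String (List Int) :=
    (PySem.List.pyRange 0 (outcomes.length : Int) 1).foldl
      (fun d i => d.modify (PySem.List.pyGetD categories i "") [] (· ++ [PySem.List.pyGetD outcomes i 0]))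
      PySem.Dict.empty
  buckets.items.map (fun p => (p.1, p.2.sum))

-- ===== PRECONDITION & SPEC =====
-- Pre_ excludes exactly the inputs where Python raises IndexError: categories shorter than outcomes.
def Pre_categories_of_outcomes (outcomes : List Int) (categories : List String) : Prop :=
  outcomes.length ≤ categories.length
instance (outcomes : List Int) (categories : List String) : Decidable (Pre_categories_of_outcomes outcomes categories) := by unfold Pre_categories_of_outcomes; infer_instance
def pvWitness_categories_of_outcomes : List Int × List String := ([3, -1, 4], ["a", "b", "a"])
def Spec_categories_of_outcomes (outcomes : List Int) (categories : List String) (out : List (String × Int)) : Prop := out = categories_of_outcomes_alt outcomes categories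
instance (outcomes : List Int) (categories : List String) (out : List (String × Int)) : Decidable (Spec_categories_of_outcomes outcomes categories out) := by unfold Spec_categories_of_outcomes; infer_instance

-- ===== CLAIM (what is proved, stated in full; the proofs are below) =====
def Claim_equal_categories_of_outcomes : Prop := ∀ (outcomes : List Int) (categories : List String), Dom_categories_of_outcomes outcomes categories → Pre_categories_of_outcomes outcomes categories → Spec_categories_of_outcomes outcomes categories (categories_of_outcomes outcomes categories)

-- ===== LEMMAS AND PROOFS =====

-- The index loop over range(len(outcomes)) is a fold over the zipped lists.
theorem foldPy {β : Type} (g : β → Int → String → β) :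
    ∀ (os : List Int) (cs : List String), os.length ≤ cs.length → ∀ (init : β),
    (PySem.List.pyRange 0 (os.length : Int) 1).foldl
        (fun d i => g d (PySem.List.pyGetD os i 0) (PySem.List.pyGetD cs i "")) init
      = (os.zip cs).foldl (fun d p => g d p.1 p.2) init := by
  intro os cs h init
  rw [PySem.List.pyRange_zero_nat, List.foldl_map]
  simp only [PySem.List.pyGetD_natCast]
  induction os generalizing cs init with
  | nil => simp
  | cons o os ih =>
    cases cs with
    | nil => simp at h
    | cons c cs =>
      rw [List.length_cons, List.range_succ_eq_map, List.foldl_cons, List.foldl_map]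
      simp only [List.getD_cons_succ, List.getD_cons_zero, List.zip_cons_cons, List.foldl_cons]
      exact ih cs (by simpa using h) _

-- Looking up in the summed image of a bucket dict is summing the looked-up bucket.
theorem lookup_map_sum : ∀ (l : List (String × List Int)) (c : String),
    (PySem.Dict.mk (l.map (fun q => (q.1, q.2.sum)))).get? c
      = ((PySem.Dict.mk l).get? c).map List.sum := by
  intro l c
  induction l with
  | nil => rfl
  | cons q l ih =>
    obtain ⟨k, vs⟩ := q
    rw [List.map_cons, PySem.Dict.get?_mk_cons, PySem.Dict.get?_mk_cons]
    by_cases hq : (k == c) = true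
    · rw [if_pos hq, if_pos hq]; rfl
    · rw [if_neg hq, if_neg hq]; exact ih

-- One loop step of A on the summed image of the buckets is the summed image of one loop step of B.
theorem step_sum (dB : PySem.Dict String (List Int)) (v : Int) (c : String) :
    (if (PySem.Dict.mk (dB.items.map (fun q => (q.1, q.2.sum)))).contains c then
       (PySem.Dict.mk (dB.items.map (fun q => (q.1, q.2.sum)))).insert c
         ((PySem.Dict.mk (dB.items.map (fun q => (q.1, q.2.sum)))).getD c 0 + v)
     else (PySem.Dict.mk (dB.items.map (fun q => (q.1, q.2.sum)))).insert c v)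
    = PySem.Dict.mk (((dB.modify c [] (· ++ [v]))).items.map (fun q => (q.1, q.2.sum))) := by
  have hmod : dB.modify c [] (· ++ [v]) = dB.insert c (dB.getD c [] ++ [v]) := rfl
  set dA := PySem.Dict.mk (dB.items.map (fun q => (q.1, q.2.sum))) with hdA
  have hitems : dA.items = dB.items.map (fun q => (q.1, q.2.sum)) := rfl
  have hget : ∀ x, dA.get? x = (dB.get? x).map List.sum := by
    intro x
    have := lookup_map_sum dB.items x
    simpa [hdA] using this
  have hcont : dA.contains c = dB.contains c := by
    rw [PySem.Dict.contains_eq_isSome_get?, PySem.Dict.contains_eq_isSome_get?, hget]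
    cases dB.get? c <;> rfl
  by_cases hc : dB.contains c = true
  · have hgd : dA.getD c 0 = (dB.getD c []).sum := by
      rw [PySem.Dict.getD_eq_get?_getD, PySem.Dict.getD_eq_get?_getD, hget]
      rcases h : dB.get? c with _ | w
      · rw [PySem.Dict.contains_eq_isSome_get?, h] at hc; simp at hc
      · rfl
    rw [if_pos (by rw [hcont]; exact hc), hmod]
    apply PySem.Dict.ext
    rw [PySem.Dict.items_insert_of_contains _ _ (by rw [hcont]; exact hc),
        PySem.Dict.items_insert_of_contains _ _ hc, hitems, List.map_map, List.map_map]
    apply List.map_congr_left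
    intro q _
    by_cases hq : q.1 = c
    · simp [hq, hgd, List.sum_append]
    · simp [hq]
  · have hc' : dB.contains c = false := by simpa using hc
    have hgd : dB.getD c [] = [] := PySem.Dict.getD_of_not_contains _ _ hc'
    rw [if_neg (by rw [hcont, hc']; simp), hmod, hgd]
    apply PySem.Dict.ext
    rw [PySem.Dict.items_insert_of_not_contains _ _ (by rw [hcont]; exact hc'),
        PySem.Dict.items_insert_of_not_contains _ _ hc', hitems, List.map_append]
    simp

-- Loop invariant: A's dict is everywhere the summed image of B's bucket dict.
theorem inv_sum : ∀ (ps : List (Int × String)) (dB : PySem.Dict String (List Int)),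
    ps.foldl (fun d p => if d.contains p.2 then d.insert p.2 (d.getD p.2 0 + p.1)
                         else d.insert p.2 p.1)
      (PySem.Dict.mk (dB.items.map (fun q => (q.1, q.2.sum))))
    = PySem.Dict.mk ((ps.foldl (fun d p => d.modify p.2 [] (· ++ [p.1])) dB).items.map
        (fun q => (q.1, q.2.sum))) := by
  intro ps
  induction ps with
  | nil => intro dB; rfl
  | cons p ps ih =>
    intro dB
    rw [List.foldl_cons, List.foldl_cons, step_sum dB p.1 p.2]
    exact ih _

-- ===== VERDICT (by name: the statement is the Claim_ definition above) =====
theorem categories_of_outcomes_spec : Claim_equal_categories_of_outcomes := by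
  intro outcomes categories _ hpre
  unfold Spec_categories_of_outcomes categories_of_outcomes categories_of_outcomes_alt
  show (List.foldl
      (fun d i => if PySem.Dict.contains d (PySem.List.pyGetD categories i "") = true then
          PySem.Dict.insert d (PySem.List.pyGetD categories i "")
            (PySem.Dict.getD d (PySem.List.pyGetD categories i "") 0 + PySem.List.pyGetD outcomes i 0)
        else PySem.Dict.insert d (PySem.List.pyGetD categories i "") (PySem.List.pyGetD outcomes i 0))
      PySem.Dict.empty (PySem.List.pyRange 0 (outcomes.length : Int) 1)).items
    = ((List.foldl
        (fun d i => PySem.Dict.modify d (PySem.List.pyGetD categories i "") []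
          (fun x => x ++ [PySem.List.pyGetD outcomes i 0]))
        PySem.Dict.empty (PySem.List.pyRange 0 (outcomes.length : Int) 1)).items).map
        (fun p => (p.1, p.2.sum))
  rw [foldPy (fun d v c => if PySem.Dict.contains d c = true then
        PySem.Dict.insert d c (PySem.Dict.getD d c 0 + v) else PySem.Dict.insert d c v)
      outcomes categories hpre,
    foldPy (fun d v c => PySem.Dict.modify d c [] (fun x => x ++ [v])) outcomes categories hpre]
  have h0 : (PySem.Dict.empty : PySem.Dict String Int)
      = PySem.Dict.mk (((PySem.Dict.empty : PySem.Dict String (List Int))).items.map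
          (fun q => (q.1, q.2.sum))) := rfl
  rw [h0, inv_sum]
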